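-- pv_equiv track=rewrite | github.com/P-Nithish/Hackathon | smpl.py | evaluate_cnf_query
-- ===== SOURCE A (Python) =====
-- def evaluate_cnf_query(inverted_index, cnf_query):
--     clauses = [clause.strip() for clause in cnf_query.lower().split(' and ')]
--     doc_sets = []
--
--     for clause in clauses:
--         # Split terms by OR
--         terms = [term.strip() for term in clause.split(' or ')]
--         postings_lists = [set(inverted_index.get(term, [])) for term in terms]
--         if not postings_lists:
--             continue
--         # OR within a clause
--         clause_docs = set.union(*postings_lists)
--         doc_sets.append(clause_docs)
--     if not doc_sets:
--         return []
--     result_docs = set.intersection(*doc_sets)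
--     return sorted(list(result_docs))
-- ===== SOURCE B (Python) =====
-- def evaluate_cnf_query(inverted_index, cnf_query):
--     clauses = [c.strip() for c in cnf_query.lower().split(' and ')]
--     counts = {}
--     for clause in clauses:
--         clause_docs = set()
--         for term in clause.split(' or '):
--             clause_docs.update(inverted_index.get(term.strip(), []))
--         for doc in clause_docs:
--             counts[doc] = counts.get(doc, 0) + 1
--     return sorted(d for d, c in counts.items() if c == len(clauses))
-- ===== Notes on version B (the rewrite author's own statement) =====
-- stated objective: alternative
-- what changed: Instead of collecting each clause's OR-union set and folding set intersections, B increments a per-document counter once per clause whose union set contains the document, and returns the sorted documents whose count equals the number of clauses.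
import Mathlib
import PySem

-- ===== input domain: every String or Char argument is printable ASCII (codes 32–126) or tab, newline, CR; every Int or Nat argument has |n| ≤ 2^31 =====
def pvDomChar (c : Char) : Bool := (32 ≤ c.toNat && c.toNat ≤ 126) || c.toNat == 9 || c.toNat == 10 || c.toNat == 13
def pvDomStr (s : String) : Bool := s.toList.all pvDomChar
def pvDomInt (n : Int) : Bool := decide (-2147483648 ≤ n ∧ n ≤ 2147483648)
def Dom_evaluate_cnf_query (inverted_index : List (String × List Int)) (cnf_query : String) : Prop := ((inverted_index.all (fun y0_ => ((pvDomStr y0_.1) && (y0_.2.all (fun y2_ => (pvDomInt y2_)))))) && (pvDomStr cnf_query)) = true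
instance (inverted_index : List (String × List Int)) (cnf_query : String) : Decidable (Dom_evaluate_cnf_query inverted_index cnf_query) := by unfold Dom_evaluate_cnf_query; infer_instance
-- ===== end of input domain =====

-- B replaces A's fold of set intersections by a per-document clause counter thresholded at the clause count (alternative algorithm, same cost).


-- ===== PORT A =====
def evaluate_cnf_query (inverted_index : List (String × List Int)) (cnf_query : String) : List Int :=
  let clauses := (PySem.Chars.splitOn (PySem.Chars.lower cnf_query.toList) " and ".toList).map PySem.Chars.strip
  let doc_sets := clauses.foldl (fun ds clause =>
    let terms := (PySem.Chars.splitOn clause " or ".toList).map PySem.Chars.strip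
    let postings_lists := terms.map (fun t => PySem.Set.ofList ((PySem.Dict.mk inverted_index).getD (String.ofList t) []))
    match postings_lists with
    | [] => ds
    | p :: rest => ds ++ [rest.foldl PySem.Set.union p]) ([] : List (PySem.Set Int))
  match doc_sets with
  | [] => ([] : List Int)
  | d :: rest => PySem.List.sorted (rest.foldl PySem.Set.inter d) (fun x => x) false

-- ===== PORT B =====
def evaluate_cnf_query_alt (inverted_index : List (String × List Int)) (cnf_query : String) : List Int :=
  let clauses := (PySem.Chars.splitOn (PySem.Chars.lower cnf_query.toList) " and ".toList).map PySem.Chars.strip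
  let counts := clauses.foldl (fun (d : PySem.Dict Int Int) clause =>
    let clause_docs := (PySem.Chars.splitOn clause " or ".toList).foldl
      (fun s term => PySem.Set.update s ((PySem.Dict.mk inverted_index).getD (String.ofList (PySem.Chars.strip term)) [])) PySem.Set.empty
    clause_docs.foldl (fun d doc => d.modify doc 0 (· + 1)) d) PySem.Dict.empty
  PySem.List.sorted ((counts.items.filter (fun p => p.2 == (clauses.length : Int))).map Prod.fst) (fun x => x) false

-- ===== PRECONDITION & SPEC =====
def Spec_evaluate_cnf_query (inverted_index : List (String × List Int)) (cnf_query : String) (out : List Int) : Prop := out = evaluate_cnf_query_alt inverted_index cnf_query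
instance (inverted_index : List (String × List Int)) (cnf_query : String) (out : List Int) : Decidable (Spec_evaluate_cnf_query inverted_index cnf_query out) := by unfold Spec_evaluate_cnf_query; infer_instance

-- ===== CLAIM (what is proved, stated in full; the proofs are below) =====
def Claim_equal_evaluate_cnf_query : Prop := ∀ (inverted_index : List (String × List Int)) (cnf_query : String), Dom_evaluate_cnf_query inverted_index cnf_query → Spec_evaluate_cnf_query inverted_index cnf_query (evaluate_cnf_query inverted_index cnf_query)

-- ===== LEMMAS AND PROOFS =====

-- splitOn never returns the empty list (Python str.split always yields at least one piece)
theorem pv_splitOn_go_ne_nil (sep : List Char) (fuel : Nat) (l cur : List Char) (acc : List (List Char)) :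
    PySem.Chars.splitOn.go sep fuel l cur acc ≠ [] := by
  induction fuel generalizing l cur acc with
  | zero => unfold PySem.Chars.splitOn.go; simp
  | succ n ih =>
      unfold PySem.Chars.splitOn.go
      cases l with
      | nil => simp
      | cons c rest =>
          by_cases h : sep.isPrefixOf (c :: rest) = true
          · simpa [h] using ih _ _ _
          · simpa [h] using ih _ _ _

theorem pv_splitOn_ne_nil (s sep : List Char) : PySem.Chars.splitOn s sep ≠ [] :=
  pv_splitOn_go_ne_nil sep _ s [] []

-- the document list a term contributes (shared by both ports)
def pvLk (inverted_index : List (String × List Int)) (term : List Char) : List Int :=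
  (PySem.Dict.mk inverted_index).getD (String.ofList (PySem.Chars.strip term)) []

-- the per-clause OR-union set, in B's form
def pvClauseSet (inverted_index : List (String × List Int)) (clause : List Char) : PySem.Set Int :=
  (PySem.Chars.splitOn clause " or ".toList).foldl
    (fun s term => PySem.Set.update s (pvLk inverted_index term)) PySem.Set.empty

theorem pv_update_ofList {α : Type} [BEq α] [LawfulBEq α] (s : PySem.Set α) (l : List α) :
    PySem.Set.update s (PySem.Set.ofList l) = PySem.Set.update s l := by
  induction l using List.reverseRecOn with
  | nil => simp [PySem.Set.ofList_nil]
  | append_singleton l x ih =>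
      rw [PySem.Set.ofList_append_singleton, PySem.Set.update_append]
      by_cases hx : x ∈ PySem.Set.ofList l
      · rw [PySem.Set.add_of_mem hx, ih]
        have hx' : x ∈ PySem.Set.update s l := by
          rw [PySem.Set.mem_update]; right; exact (PySem.Set.mem_ofList _ _).mp hx
        have hsing : PySem.Set.update (PySem.Set.update s l) [x] = PySem.Set.add (PySem.Set.update s l) x := rfl
        rw [hsing, PySem.Set.add_of_mem hx']
      · rw [PySem.Set.add_of_not_mem hx, PySem.Set.update_append, ih]

-- A's clause construction yields exactly pvClauseSet
theorem pv_clauseA_eq (idx : List (String × List Int)) (clause : List Char) :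
    (match ((PySem.Chars.splitOn clause " or ".toList).map PySem.Chars.strip).map
        (fun t => PySem.Set.ofList ((PySem.Dict.mk idx).getD (String.ofList t) [])) with
      | [] => PySem.Set.empty
      | p :: rest => rest.foldl PySem.Set.union p) = pvClauseSet idx clause := by
  rw [List.map_map]
  obtain ⟨t0, ts, hsp⟩ := List.exists_cons_of_ne_nil (pv_splitOn_ne_nil clause " or ".toList)
  rw [pvClauseSet, hsp]
  simp only [List.map_cons, List.foldl_cons, List.foldl_map, Function.comp, pvLk,
    PySem.Set.empty, PySem.Set.update_nil_left, PySem.Set.union, pv_update_ofList]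

theorem pv_nodup_clauseSet (idx : List (String × List Int)) (clause : List Char) :
    (pvClauseSet idx clause).Nodup := by
  rw [pvClauseSet]
  generalize (PySem.Chars.splitOn clause " or ".toList) = ts
  have : ∀ (s : PySem.Set Int), s.Nodup → (ts.foldl (fun s term => PySem.Set.update s (pvLk idx term)) s).Nodup := by
    induction ts with
    | nil => intro s hs; exact hs
    | cons t ts ih => intro s hs; exact ih _ (PySem.Set.nodup_update _ _ hs)
  exact this _ (by simp [PySem.Set.empty])

-- A's doc_sets fold is a map over clauses
theorem pv_docsets_eq_map (idx : List (String × List Int)) (clauses : List (List Char)) (ds : List (PySem.Set Int)) :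
    clauses.foldl (fun ds clause =>
      match ((PySem.Chars.splitOn clause " or ".toList).map PySem.Chars.strip).map
          (fun t => PySem.Set.ofList ((PySem.Dict.mk idx).getD (String.ofList t) [])) with
        | [] => ds
        | p :: rest => ds ++ [rest.foldl PySem.Set.union p]) ds
      = ds ++ clauses.map (pvClauseSet idx) := by
  induction clauses generalizing ds with
  | nil => simp
  | cons c cs ih =>
      obtain ⟨t0, ts, hsp⟩ := List.exists_cons_of_ne_nil (pv_splitOn_ne_nil c " or ".toList)
      have hA := pv_clauseA_eq idx c
      rw [hsp] at hA
      simp only [List.map_cons] at hA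
      simp only [List.foldl_cons, hsp, List.map_cons]
      rw [hA, ih]
      simp

-- intersection fold: membership and nodup
theorem pv_mem_foldl_inter (rest : List (PySem.Set Int)) (d : PySem.Set Int) (x : Int) :
    x ∈ rest.foldl PySem.Set.inter d ↔ x ∈ d ∧ ∀ s ∈ rest, x ∈ s := by
  induction rest generalizing d with
  | nil => simp
  | cons s rest ih =>
      simp only [List.foldl_cons, ih, PySem.Set.mem_inter, List.mem_cons]
      constructor
      · rintro ⟨⟨hd, hs⟩, hall⟩
        exact ⟨hd, fun t ht => ht.elim (fun h => h ▸ hs) (hall t)⟩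
      · rintro ⟨hd, hall⟩
        exact ⟨⟨hd, hall s (Or.inl rfl)⟩, fun t ht => hall t (Or.inr ht)⟩

theorem pv_nodup_foldl_inter (rest : List (PySem.Set Int)) (d : PySem.Set Int) (hd : d.Nodup) :
    (rest.foldl PySem.Set.inter d).Nodup := by
  induction rest generalizing d with
  | nil => exact hd
  | cons s rest ih => exact ih _ (PySem.Set.nodup_inter _ _ hd)

-- B's counter fold: value is a countP, keys collect the union
theorem pv_counts_getD (L : List (PySem.Set Int)) (d : PySem.Dict Int Int) (x : Int)
    (hL : ∀ s ∈ L, s.Nodup) :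
    (L.foldl (fun d s => s.foldl (fun d doc => d.modify doc 0 (· + 1)) d) d).getD x 0
      = d.getD x 0 + (L.countP (fun s => decide (x ∈ s)) : Int) := by
  induction L generalizing d with
  | nil => simp
  | cons s L ih =>
      simp only [List.foldl_cons]
      rw [ih _ (fun t ht => hL t (List.mem_cons_of_mem _ ht)),
        PySem.Dict.getD_foldl_modify_add_one, List.countP_cons]
      have hs := hL s (List.mem_cons_self ..)
      by_cases hx : x ∈ s
      · rw [List.count_eq_one_of_mem hs hx]; simp [hx]; ring
      · rw [List.count_eq_zero_of_not_mem hx]; simp [hx]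

theorem pv_counts_keys_nodup (L : List (PySem.Set Int)) (d : PySem.Dict Int Int) (hd : d.keys.Nodup) :
    (L.foldl (fun d s => s.foldl (fun d doc => d.modify doc 0 (· + 1)) d) d).keys.Nodup := by
  induction L generalizing d with
  | nil => exact hd
  | cons s L ih =>
      exact ih _ (PySem.Dict.nodup_keys_foldl_modify_key s (fun doc => doc) 0 (fun _ _ => (· + 1)) d hd)

theorem pv_counts_mem_keys (L : List (PySem.Set Int)) (d : PySem.Dict Int Int) (x : Int) :
    x ∈ (L.foldl (fun d s => s.foldl (fun d doc => d.modify doc 0 (· + 1)) d) d).keys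
      ↔ x ∈ d.keys ∨ ∃ s ∈ L, x ∈ s := by
  induction L generalizing d with
  | nil => simp
  | cons s L ih =>
      simp only [List.foldl_cons, ih]
      rw [PySem.Dict.keys_foldl_modify]
      simp only [PySem.Set.mem_update, List.mem_cons]
      constructor
      · rintro ((h | h) | ⟨t, ht, hx⟩)
        · exact Or.inl h
        · exact Or.inr ⟨s, Or.inl rfl, h⟩
        · exact Or.inr ⟨t, Or.inr ht, hx⟩
      · rintro (h | ⟨t, (rfl | ht), hx⟩)
        · exact Or.inl (Or.inl h)
        · exact Or.inl (Or.inr hx)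
        · exact Or.inr ⟨t, ht, hx⟩

-- the heart: intersection-fold vs counter-threshold, over any nonempty list of nodup sets
theorem pv_main (d0 : PySem.Set Int) (rest : List (PySem.Set Int)) (k : Int)
    (hk : k = (rest.length : Int) + 1) (hL : ∀ s ∈ d0 :: rest, s.Nodup) :
    PySem.List.sorted (rest.foldl PySem.Set.inter d0) (fun x => x) false
    = PySem.List.sorted
        ((((d0 :: rest).foldl (fun (d : PySem.Dict Int Int) s => s.foldl (fun d doc => d.modify doc 0 (· + 1)) d) PySem.Dict.empty).items.filter
          (fun p => p.2 == k)).map Prod.fst) (fun x => x) false := by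
  have hd : d0.Nodup := hL d0 (List.mem_cons_self ..)
  have hkn : ((d0 :: rest).foldl (fun (d : PySem.Dict Int Int) s => s.foldl (fun d doc => d.modify doc 0 (· + 1)) d) PySem.Dict.empty).keys.Nodup := by
    apply pv_counts_keys_nodup
    simp [PySem.Dict.empty, PySem.Dict.keys]
  rw [PySem.Dict.items_eq_map_keys _ hkn 0, List.filter_map, List.map_map]
  have hfst : (Prod.fst ∘ fun x => (x, ((d0 :: rest).foldl (fun (d : PySem.Dict Int Int) s => s.foldl (fun d doc => d.modify doc 0 (· + 1)) d) PySem.Dict.empty).getD x 0)) = id := rfl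
  rw [hfst, List.map_id]
  apply (PySem.List.sorted_id_eq_sorted_id_iff_perm _ _).mpr
  apply (List.perm_ext_iff_of_nodup (pv_nodup_foldl_inter _ _ hd) (List.Nodup.filter _ hkn)).mpr
  intro x
  rw [pv_mem_foldl_inter, List.mem_filter, Function.comp]
  simp only [pv_counts_getD _ _ _ hL, pv_counts_mem_keys, PySem.Dict.getD_empty,
    PySem.Dict.keys_empty, List.not_mem_nil, false_or, zero_add, beq_iff_eq, hk]
  constructor
  · rintro ⟨hxd, hall⟩
    refine ⟨⟨d0, List.mem_cons_self .., hxd⟩, ?_⟩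
    have hc : (d0 :: rest).countP (fun s => decide (x ∈ s)) = (d0 :: rest).length := by
      apply List.countP_eq_length.mpr
      intro s hs
      rcases hs with _ | hs
      · exact decide_eq_true hxd
      · exact decide_eq_true (hall _ (by assumption))
    rw [hc]; simp
  · rintro ⟨-, hcnt⟩
    have hlen : (d0 :: rest).countP (fun s => decide (x ∈ s)) = (d0 :: rest).length := by
      rw [List.length_cons]
      exact_mod_cast hcnt
    have hall := List.countP_eq_length.mp hlen
    exact ⟨of_decide_eq_true (hall d0 (List.mem_cons_self ..)),
      fun s hs => of_decide_eq_true (hall s (List.mem_cons_of_mem _ hs))⟩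

-- ===== VERDICT (by name: the statement is the Claim_ definition above) =====
theorem evaluate_cnf_query_spec : Claim_equal_evaluate_cnf_query := by
  intro idx q _
  unfold Spec_evaluate_cnf_query evaluate_cnf_query evaluate_cnf_query_alt
  simp only
  rw [pv_docsets_eq_map idx _ [], List.nil_append]
  have hB : ∀ (cs : List (List Char)) (d : PySem.Dict Int Int),
      cs.foldl (fun d clause =>
        ((PySem.Chars.splitOn clause " or ".toList).foldl
          (fun s term => PySem.Set.update s ((PySem.Dict.mk idx).getD (String.ofList (PySem.Chars.strip term)) [])) PySem.Set.empty).foldl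
          (fun d doc => d.modify doc 0 (· + 1)) d) d
      = (cs.map (pvClauseSet idx)).foldl (fun d s => s.foldl (fun d doc => d.modify doc 0 (· + 1)) d) d := by
    intro cs
    induction cs with
    | nil => intro d; rfl
    | cons c cs ih => intro d; simp only [List.foldl_cons, List.map_cons, ih, pvClauseSet, pvLk]
  rw [hB]
  obtain ⟨c0, cs, hsp⟩ := List.exists_cons_of_ne_nil
    (pv_splitOn_ne_nil (PySem.Chars.lower q.toList) " and ".toList)
  rw [hsp]
  simp only [List.map_cons]
  exact pv_main _ _ _ (by simp) (fun s hs => by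
    rcases List.mem_cons.mp hs with rfl | hs
    · exact pv_nodup_clauseSet idx _
    · obtain ⟨c, -, rfl⟩ := List.mem_map.mp hs
      exact pv_nodup_clauseSet idx c)
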